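-- pv_equiv track=rewrite | github.com/timothymichael25/UG5_D_71220866 | 1_D_71220866.py | ganti_kata
-- ===== SOURCE A (Python) =====
-- def ganti_kata(kalimat, cari, ganti):
--     kalimat_baru = ""
--     kata = ""
--     for i in range(len(kalimat)):
--         if kalimat[i] == " ":
--             if kata == cari:
--                 kalimat_baru += ganti + " "
--             else:
--                 kalimat_baru += kata + " "
--             kata = ""
--         else:
--             kata += kalimat[i]
--     if kata == cari:
--         kalimat_baru += ganti
--     else:
--         kalimat_baru += kata
--     return kalimat_baru
-- ===== SOURCE B (Python) =====
-- def ganti_kata(kalimat, cari, ganti):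
--     return " ".join(ganti if w == cari else w for w in kalimat.split(" "))
-- ===== Notes on version B (the rewrite author's own statement) =====
-- stated objective: idiomatic
-- what changed: Replaces the character-by-character tokenizer with per-word accumulator state by a split(" ")/map/join pipeline over whole tokens.
import Mathlib
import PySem

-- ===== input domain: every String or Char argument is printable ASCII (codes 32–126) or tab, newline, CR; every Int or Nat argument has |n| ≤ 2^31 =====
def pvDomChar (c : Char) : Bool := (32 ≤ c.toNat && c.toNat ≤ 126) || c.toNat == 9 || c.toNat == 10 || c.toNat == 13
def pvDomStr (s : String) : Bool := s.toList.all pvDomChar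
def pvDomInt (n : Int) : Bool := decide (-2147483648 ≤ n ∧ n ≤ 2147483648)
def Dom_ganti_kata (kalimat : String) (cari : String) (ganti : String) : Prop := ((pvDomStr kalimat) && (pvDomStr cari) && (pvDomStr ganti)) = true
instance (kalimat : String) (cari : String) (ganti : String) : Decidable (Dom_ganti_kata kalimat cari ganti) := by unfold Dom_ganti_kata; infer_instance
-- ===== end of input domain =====

-- B replaces A's character-by-character tokenizer by a split(" ")/map/join pipeline (idiomatic; same return value).


-- ===== PORT A =====
-- one loop step: the body of A's 'for i in range(len(kalimat))', state = (kalimat_baru, kata) as char lists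
def gantiKataStep (cari ganti : List Char) (st : List Char × List Char) (c : Char) : List Char × List Char :=
  if c = ' ' then
    (st.1 ++ (if st.2 = cari then ganti else st.2) ++ [' '], [])
  else
    (st.1, st.2 ++ [c])

def ganti_kata (kalimat : String) (cari : String) (ganti : String) : String :=
  let st := kalimat.toList.foldl (gantiKataStep cari.toList ganti.toList) ([], [])
  String.ofList (st.1 ++ (if st.2 = cari.toList then ganti.toList else st.2))

-- ===== PORT B =====
def ganti_kata_alt (kalimat : String) (cari : String) (ganti : String) : String :=
  match PySem.Str.split? kalimat " " with
  | some parts => PySem.Str.join " " (parts.map (fun w => if w == cari then ganti else w))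
  | none => ""  -- unreachable: the separator " " is nonempty

-- ===== PRECONDITION & SPEC =====
def Spec_ganti_kata (kalimat : String) (cari : String) (ganti : String) (out : String) : Prop := out = ganti_kata_alt kalimat cari ganti
instance (kalimat : String) (cari : String) (ganti : String) (out : String) : Decidable (Spec_ganti_kata kalimat cari ganti out) := by unfold Spec_ganti_kata; infer_instance

-- ===== CLAIM (what is proved, stated in full; the proofs are below) =====
def Claim_equal_ganti_kata : Prop := ∀ (kalimat : String) (cari : String) (ganti : String), Dom_ganti_kata kalimat cari ganti → Spec_ganti_kata kalimat cari ganti (ganti_kata kalimat cari ganti)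

-- ===== LEMMAS AND PROOFS =====

-- proof-side characterisation of splitting on a single space
def swSplit (cur : List Char) : List Char → List (List Char)
  | [] => [cur]
  | c :: rest => if c = ' ' then cur :: swSplit [] rest else swSplit (cur ++ [c]) rest

theorem go_eq_swSplit : ∀ (fuel : Nat) (l cur : List Char) (acc : List (List Char)),
    l.length < fuel →
    PySem.Chars.splitOn.go [' '] fuel l cur acc = acc.reverse ++ swSplit cur.reverse l := by
  intro fuel
  induction fuel with
  | zero => intro l cur acc h; omega
  | succ n ih =>
    intro l cur acc h
    cases l with
    | nil =>
      rw [PySem.Chars.splitOn.go.eq_def]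
      simp [swSplit]
    | cons c rest =>
      rw [PySem.Chars.splitOn.go.eq_def]
      simp only [List.isPrefixOf]
      by_cases hc : c = ' '
      · subst hc
        simp only [beq_self_eq_true, Bool.true_and, if_pos]
        rw [ih _ _ _ (by simpa using Nat.lt_of_succ_lt_succ h)]
        simp [swSplit]
      · have hb : ((' ' == c) && true) = false := by
          simp only [Bool.and_true, beq_eq_false_iff_ne, ne_eq]
          exact fun h' => hc h'.symm
        simp only [hb, if_neg Bool.false_ne_true]
        rw [ih _ _ _ (by simpa using Nat.lt_of_succ_lt_succ h)]
        simp [swSplit, hc]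

theorem splitOn_space (cs : List Char) : PySem.Chars.splitOn cs [' '] = swSplit [] cs := by
  unfold PySem.Chars.splitOn
  rw [go_eq_swSplit _ _ _ _ (by omega)]
  simp

theorem swSplit_ne_nil (cur l : List Char) : swSplit cur l ≠ [] := by
  induction l generalizing cur with
  | nil => simp [swSplit]
  | cons c rest ih =>
    simp only [swSplit]
    split
    · simp
    · exact ih _

theorem gantiKata_inv (cari ganti : List Char) :
    ∀ (cs b k : List Char),
    (let st := cs.foldl (gantiKataStep cari ganti) (b, k)
     st.1 ++ (if st.2 = cari then ganti else st.2))
    = b ++ PySem.Chars.join [' ']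
        ((swSplit k cs).map (fun w => if w = cari then ganti else w)) := by
  intro cs
  induction cs with
  | nil =>
    intro b k
    simp [swSplit, PySem.Chars.join, List.intercalate]
  | cons c rest ih =>
    intro b k
    by_cases hc : c = ' '
    · subst hc
      simp only [List.foldl_cons, gantiKataStep, if_true]
      rw [ih]
      have hne : (swSplit [] rest).map (fun w => if w = cari then ganti else w) ≠ [] := by
        simp [swSplit_ne_nil]
      simp only [swSplit, if_true, List.map_cons]
      obtain ⟨w', l', hl⟩ : ∃ w' l', (swSplit [] rest).map (fun w => if w = cari then ganti else w) = w' :: l' := by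
        rcases h : (swSplit [] rest).map (fun w => if w = cari then ganti else w) with _ | ⟨w', l'⟩
        · exact absurd h hne
        · exact ⟨w', l', rfl⟩
      rw [hl, PySem.Chars.join_cons_cons]
      simp
    · simp only [List.foldl_cons, gantiKataStep, if_neg hc]
      rw [ih]
      simp [swSplit, hc]

theorem toList_ofList (l : List Char) : (String.ofList l).toList = l := by
  simp

theorem maps_eq (cari ganti : String) : ∀ (l : List (List Char)),
    List.map String.toList
      (List.map (fun w => if w == cari then ganti else w) (List.map String.ofList l))
    = List.map (fun w => if w = cari.toList then ganti.toList else w) l := by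
  intro l
  induction l with
  | nil => rfl
  | cons a rest ih =>
    simp only [List.map_cons, ih, List.cons.injEq, and_true]
    by_cases ha : a = cari.toList
    · have hb : (String.ofList a == cari) = true := by
        rw [beq_iff_eq, ← String.toList_inj, toList_ofList, ha]
      simp [ha]
    · have hb : (String.ofList a == cari) = false := by
        rw [beq_eq_false_iff_ne]
        intro h
        exact ha (by rw [← toList_ofList a, h])
      simp [hb, ha]

-- ===== VERDICT (by name: the statement is the Claim_ definition above) =====
theorem ganti_kata_spec : Claim_equal_ganti_kata := by
  intro kalimat cari ganti _
  unfold Spec_ganti_kata ganti_kata ganti_kata_alt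
  simp only [PySem.Str.split?, PySem.Chars.split?]
  have hsep : (" " : String).toList = [' '] := by decide
  rw [hsep]
  simp only [List.isEmpty_cons, Option.map_some, if_neg Bool.false_ne_true]
  rw [splitOn_space]
  rw [gantiKata_inv cari.toList ganti.toList kalimat.toList [] []]
  simp only [List.nil_append]
  apply String.toList_inj.mp
  rw [PySem.Str.toList_join, hsep, maps_eq]
  rw [toList_ofList]
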